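-- pv_equiv track=rewrite | github.com/869277160/MyLeetCode | 2511.最多可以摧毁的敌人城堡数目.py | leftsearch
-- ===== SOURCE A (Python) =====
-- def leftsearch(forts):
--     if forts == []:
--         return 0
--     if -1 not in forts or 0 not in forts:
--         return 0
--
--     for i in range(len(forts)-1,-1,-1):
--         if forts[i] == 1:
--             return 0
--         if forts[i] == -1:
--             return len(forts) - i -1
--
--     return 0
-- ===== SOURCE B (Python) =====
-- def leftsearch(forts):
--     # Single forward pass: track last index of 1, last index of -1, and
--     # whether a 0 occurs; decide at the end.
--     last_one = -1
--     last_neg = -1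
--     has_zero = False
--     for i, v in enumerate(forts):
--         if v == 1:
--             last_one = i
--         elif v == -1:
--             last_neg = i
--         elif v == 0:
--             has_zero = True
--     if last_neg > last_one and has_zero:
--         return len(forts) - last_neg - 1
--     return 0
-- ===== Notes on version B (the rewrite author's own statement) =====
-- stated objective: alternative
-- what changed: Replaces the two membership scans plus a backward early-exit index scan with one forward pass over enumerate(forts) that maintains the last index of 1, the last index of -1 and a zero-seen flag, deciding the answer after the loop.
import Mathlib
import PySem

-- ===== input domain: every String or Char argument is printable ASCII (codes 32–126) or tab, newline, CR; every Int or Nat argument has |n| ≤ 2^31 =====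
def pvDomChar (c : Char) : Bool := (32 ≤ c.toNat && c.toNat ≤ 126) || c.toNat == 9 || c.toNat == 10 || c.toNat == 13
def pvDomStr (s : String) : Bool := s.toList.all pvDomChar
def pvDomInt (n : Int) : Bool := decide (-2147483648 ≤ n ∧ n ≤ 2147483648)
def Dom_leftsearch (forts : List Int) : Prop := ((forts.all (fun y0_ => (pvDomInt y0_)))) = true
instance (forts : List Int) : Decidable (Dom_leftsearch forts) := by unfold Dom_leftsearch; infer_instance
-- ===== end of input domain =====

-- B replaces A's membership guards and backward early-exit scan with a single
-- forward pass tracking the last indices of 1 and -1 and a zero-seen flag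
-- (objective: alternative decomposition, same O(n) cost).

-- ===== PORT A =====
-- the 'for i in range(len(forts)-1,-1,-1)' loop: i = k-1, k-2, …, 0
def leftsearchGo (forts : List Int) : Nat → Int
  | 0 => 0
  | k + 1 =>
    -- forts[i] with i = k, always in range here → default never used
    let v := PySem.List.pyGetD forts (k : Int) 0
    if v = 1 then 0
    else if v = -1 then (forts.length : Int) - (k : Int) - 1
    else leftsearchGo forts k

def leftsearch (forts : List Int) : Int :=
  if forts = [] then 0
  else if (-1 : Int) ∉ forts ∨ (0 : Int) ∉ forts then 0
  else leftsearchGo forts forts.length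

-- ===== PORT B =====
-- state = (last_one, last_neg, has_zero)
def leftsearchStep (st : Int × Int × Bool) (iv : Int × Int) : Int × Int × Bool :=
  if iv.2 = 1 then (iv.1, st.2.1, st.2.2)
  else if iv.2 = -1 then (st.1, iv.1, st.2.2)
  else if iv.2 = 0 then (st.1, st.2.1, true)
  else st

def leftsearch_alt (forts : List Int) : Int :=
  let st := (PySem.List.enumerate forts).foldl leftsearchStep (-1, -1, false)
  if st.2.1 > st.1 ∧ st.2.2 = true then (forts.length : Int) - st.2.1 - 1 else 0

-- ===== PRECONDITION & SPEC =====
def Spec_leftsearch (forts : List Int) (out : Int) : Prop := out = leftsearch_alt forts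
instance (forts : List Int) (out : Int) : Decidable (Spec_leftsearch forts out) := by unfold Spec_leftsearch; infer_instance

-- ===== CLAIM (what is proved, stated in full; the proofs are below) =====
def Claim_equal_leftsearch : Prop := ∀ (forts : List Int), Dom_leftsearch forts → Spec_leftsearch forts (leftsearch forts)

-- ===== LEMMAS AND PROOFS =====

-- last index i < k with forts.getD i 0 = v, else -1 (proof-side spec of A's scan)
def lastBelow (v : Int) (forts : List Int) : Nat → Int
  | 0 => -1
  | k + 1 => if forts.getD k 0 = v then (k : Int) else lastBelow v forts k

-- index of the last occurrence of v (proof-side spec of B's fold)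
def lastIn (v : Int) : List Int → Option Nat
  | [] => none
  | x :: xs =>
    match lastIn v xs with
    | some k => some (k + 1)
    | none => if x = v then some 0 else none

theorem lastBelow_lt (v : Int) (forts : List Int) (k : Nat) :
    lastBelow v forts k < (k : Int) := by
  induction k with
  | zero => simp [lastBelow]
  | succ k ih =>
    simp only [lastBelow]
    split_ifs <;> push_cast <;> omega

theorem lastIn_lt (v : Int) (xs : List Int) (k : Nat) (h : lastIn v xs = some k) :
    k < xs.length := by
  induction xs generalizing k with
  | nil => simp [lastIn] at h
  | cons x xs ih =>
    simp only [lastIn] at h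
    cases hx : lastIn v xs with
    | some m =>
      rw [hx] at h
      simp only [Option.some.injEq] at h
      have := ih m hx
      simp only [List.length_cons]
      omega
    | none =>
      rw [hx] at h
      split_ifs at h
      · simp only [Option.some.injEq] at h
        simp only [List.length_cons]
        omega

theorem lastIn_of_not_mem (v : Int) (xs : List Int) (h : v ∉ xs) :
    lastIn v xs = none := by
  induction xs with
  | nil => rfl
  | cons x xs ih =>
    simp only [List.mem_cons, not_or] at h
    simp [lastIn, ih h.2, Ne.symm h.1]

theorem lastIn_append (v x : Int) (xs : List Int) :
    lastIn v (xs ++ [x]) = if x = v then some xs.length else lastIn v xs := by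
  induction xs with
  | nil => by_cases hx : x = v <;> simp [lastIn, hx]
  | cons y ys ih =>
    simp only [List.cons_append, lastIn, ih]
    by_cases hx : x = v
    · simp only [if_pos hx, List.length_cons]
    · simp only [if_neg hx]

-- lastBelow over the whole list = lastIn
theorem lastBelow_append (v : Int) (xs : List Int) (x : Int) (k : Nat) (hk : k ≤ xs.length) :
    lastBelow v (xs ++ [x]) k = lastBelow v xs k := by
  induction k with
  | zero => rfl
  | succ k ih =>
    have hk' : k < xs.length := by omega
    simp only [lastBelow, List.getD, List.getElem?_append_left hk', ih (by omega)]
    rfl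

theorem lastBelow_eq_lastIn (v : Int) (xs : List Int) :
    lastBelow v xs xs.length =
      (match lastIn v xs with | some k => (k : Int) | none => -1) := by
  induction xs using List.reverseRecOn with
  | nil => rfl
  | append_singleton xs x ih =>
    have hlen : (xs ++ [x]).length = xs.length + 1 := by simp
    rw [hlen, lastIn_append]
    simp only [lastBelow, List.getD, List.getElem?_append_right (le_refl xs.length),
      Nat.sub_self, List.getElem?_cons_zero, Option.getD_some]
    split_ifs with hx
    · simp
    · rw [lastBelow_append v xs x xs.length (le_refl _), ih]

-- the fold of B computes (last index of 1, last index of -1, zero seen), offset by s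
theorem foldB (xs : List Int) (s a b : Int) (c : Bool) :
    (PySem.List.enumerate xs s).foldl leftsearchStep (a, b, c) =
      ((match lastIn 1 xs with | some k => s + (k : Int) | none => a),
       (match lastIn (-1) xs with | some k => s + (k : Int) | none => b),
       c || decide ((0 : Int) ∈ xs)) := by
  induction xs generalizing s a b c with
  | nil => simp [PySem.List.enumerate_nil, lastIn]
  | cons x xs ih =>
    rw [PySem.List.enumerate_cons, List.foldl_cons]
    rcases eq_or_ne x 1 with hx1 | hx1
    · subst hx1
      rw [show leftsearchStep (a, b, c) (s, 1) = (s, b, c) from by norm_num [leftsearchStep], ih]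
      cases h1 : lastIn 1 xs <;> cases hn : lastIn (-1) xs <;>
        simp [lastIn, h1, hn] <;> (try constructor) <;> ring
    · rcases eq_or_ne x (-1) with hxn | hxn
      · subst hxn
        rw [show leftsearchStep (a, b, c) (s, -1) = (a, s, c) from by norm_num [leftsearchStep], ih]
        cases h1 : lastIn 1 xs <;> cases hn : lastIn (-1) xs <;>
          simp [lastIn, h1, hn] <;> (try constructor) <;> ring
      · rcases eq_or_ne x 0 with hx0 | hx0
        · subst hx0
          rw [show leftsearchStep (a, b, c) (s, 0) = (a, b, true) from by norm_num [leftsearchStep], ih]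
          cases h1 : lastIn 1 xs <;> cases hn : lastIn (-1) xs <;>
            simp [lastIn, h1, hn] <;> (try constructor) <;> ring
        · rw [show leftsearchStep (a, b, c) (s, x) = (a, b, c) from by
              simp [leftsearchStep, hx1, hxn, hx0], ih]
          cases h1 : lastIn 1 xs <;> cases hn : lastIn (-1) xs <;>
            simp [lastIn, h1, hn, hx1, hxn, Ne.symm hx0] <;> (try constructor) <;> ring

-- A's scan agrees with the lastBelow characterisation
theorem goA (forts : List Int) (k : Nat) (hk : k ≤ forts.length) :
    leftsearchGo forts k =
      (if lastBelow (-1) forts k > lastBelow 1 forts k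
       then (forts.length : Int) - lastBelow (-1) forts k - 1 else 0) := by
  induction k with
  | zero => simp [leftsearchGo, lastBelow]
  | succ k ih =>
    have hk' : k < forts.length := by omega
    have hget : PySem.List.pyGetD forts (k : Int) 0 = forts[k]?.getD 0 := by
      simp [PySem.List.pyGetD_natCast, List.getD]
    simp only [leftsearchGo, hget, lastBelow, List.getD, gt_iff_lt]
    by_cases h1 : forts[k]?.getD 0 = 1
    · have hn : ¬ forts[k]?.getD 0 = -1 := by rw [h1]; decide
      have hlt := lastBelow_lt (-1) forts k
      rw [if_pos h1, if_pos h1, if_neg hn, if_neg (by omega)]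
    · by_cases hn : forts[k]?.getD 0 = -1
      · have hlt := lastBelow_lt 1 forts k
        rw [if_neg h1, if_pos hn, if_neg h1, if_pos hn, if_pos (by omega)]
      · rw [if_neg h1, if_neg hn, if_neg h1, if_neg hn, ih (by omega)]

-- ===== VERDICT (by name: the statement is the Claim_ definition above) =====
theorem leftsearch_spec : Claim_equal_leftsearch := by
  intro forts _
  unfold Spec_leftsearch leftsearch leftsearch_alt
  rw [show PySem.List.enumerate forts = PySem.List.enumerate forts 0 from rfl,
    foldB forts 0 (-1) (-1) false]
  have h1lt := fun k h => lastIn_lt 1 forts k h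
  have hnlt := fun k h => lastIn_lt (-1) forts k h
  split_ifs with hnil hmem
  · subst hnil; simp [lastIn]
  · -- A's guards return 0; show B's condition fails
    rcases hmem with hneg | hzero
    · rw [lastIn_of_not_mem _ _ hneg]
      simp only
      cases h1 : lastIn 1 forts <;> simp
    · simp [hzero]
  · -- main case: both scan
    rw [not_or, not_not, not_not] at hmem
    rw [goA forts forts.length (le_refl _), lastBelow_eq_lastIn, lastBelow_eq_lastIn]
    simp only [hmem.2, decide_true, Bool.false_or]
    cases h1 : lastIn 1 forts <;> cases hn : lastIn (-1) forts <;>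
      simp only [zero_add] <;> split_ifs <;> simp_all
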